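-- pv_equiv track=rewrite | github.com/lesleslie/crackerjack | scripts/integrate_resource_management.py | _separate_import_and_other_lines
-- ===== SOURCE A (Python) =====
-- def _separate_import_and_other_lines(content: str) -> tuple[list[str], list[str]]:
--     """Separate import lines from other lines in the content."""
--     import_lines = []
--     other_lines = []
--     in_imports = True
--
--     for line in content.split("\n"):
--         if in_imports and (line.startswith(("import ", "from ")) or line.strip() == ""):
--             import_lines.append(line)
--         elif line.strip() and not line.startswith("#"):
--             in_imports = False
--             other_lines.append(line)
--         else:
--             if in_imports:
--                 import_lines.append(line)
--             else:
--                 other_lines.append(line)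
--
--     return import_lines, other_lines
-- ===== SOURCE B (Python) =====
-- def _is_body_line(line):
--     return bool(line.strip()) and not line.startswith(("#", "import ", "from "))
--
--
-- def _separate_import_and_other_lines(content: str) -> tuple[list[str], list[str]]:
--     """Separate import lines from other lines: find the first body line, slice there."""
--     lines = content.split("\n")
--     i = 0
--     while i < len(lines) and not _is_body_line(lines[i]):
--         i += 1
--     return lines[:i], lines[i:]
-- ===== Notes on version B (the rewrite author's own statement) =====
-- stated objective: simpler
-- what changed: Replaces the per-line flag state machine with two appended accumulators by finding the first substantive line (non-blank, neither a comment nor an import/from line) and slicing the line list at that boundary.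
import Mathlib
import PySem

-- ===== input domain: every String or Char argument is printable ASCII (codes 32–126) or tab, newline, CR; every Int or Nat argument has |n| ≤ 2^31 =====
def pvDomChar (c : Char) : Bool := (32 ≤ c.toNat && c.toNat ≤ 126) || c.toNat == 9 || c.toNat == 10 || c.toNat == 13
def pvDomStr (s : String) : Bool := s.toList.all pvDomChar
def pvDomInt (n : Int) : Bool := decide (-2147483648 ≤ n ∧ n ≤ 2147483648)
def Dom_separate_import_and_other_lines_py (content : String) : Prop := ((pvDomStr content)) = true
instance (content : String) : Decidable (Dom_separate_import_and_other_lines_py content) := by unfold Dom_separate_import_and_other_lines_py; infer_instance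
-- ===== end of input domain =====

-- B finds the first substantive (non-blank, non-comment, non-import) line and slices there, instead of A's per-line flag state machine (simpler decomposition).

-- ===== PORT A =====
-- content.split("\n") (sep is nonempty, so Python's str.split cannot raise)
def pvLines (content : String) : List String :=
  (PySem.Chars.splitOn content.toList ['\n']).map String.ofList

-- one loop step of A's for-loop: state = (import_lines, other_lines, in_imports)
def pvStepA (st : List String × List String × Bool) (line : String) : List String × List String × Bool :=
  let (imp, oth, inImports) := st
  if inImports && (PySem.Str.startswith line "import " || PySem.Str.startswith line "from " || PySem.Str.strip line == "") then
    (imp ++ [line], oth, inImports)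
  else if PySem.Str.strip line != "" && !PySem.Str.startswith line "#" then
    (imp, oth ++ [line], false)
  else if inImports then
    (imp ++ [line], oth, inImports)
  else
    (imp, oth ++ [line], inImports)

def separate_import_and_other_lines_py (content : String) : List String × List String :=
  let st := (pvLines content).foldl pvStepA ([], [], true)
  (st.1, st.2.1)

-- ===== PORT B =====
-- B's helper _is_body_line
def pvIsBody (line : String) : Bool :=
  PySem.Str.strip line != "" &&
    !(PySem.Str.startswith line "#" || PySem.Str.startswith line "import " || PySem.Str.startswith line "from ")

def separate_import_and_other_lines_py_alt (content : String) : List String × List String :=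
  let lines := pvLines content
  let i := lines.findIdx pvIsBody
  (lines.take i, lines.drop i)

-- ===== PRECONDITION & SPEC =====
def Spec_separate_import_and_other_lines_py (content : String) (out : List String × List String) : Prop := out = separate_import_and_other_lines_py_alt content
instance (content : String) (out : List String × List String) : Decidable (Spec_separate_import_and_other_lines_py content out) := by unfold Spec_separate_import_and_other_lines_py; infer_instance

-- ===== CLAIM (what is proved, stated in full; the proofs are below) =====
def Claim_equal_separate_import_and_other_lines_py : Prop := ∀ (content : String), Dom_separate_import_and_other_lines_py content → Spec_separate_import_and_other_lines_py content (separate_import_and_other_lines_py content)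

-- ===== LEMMAS AND PROOFS =====

-- with in_imports = true, a step sends a body line to other_lines (flipping the
-- flag) and any other line to import_lines
theorem pvStepA_true (l : String) (imp oth : List String) :
    pvStepA (imp, oth, true) l =
      if pvIsBody l then (imp, oth ++ [l], false) else (imp ++ [l], oth, true) := by
  simp only [pvStepA, pvIsBody]
  split_ifs <;> simp_all [bne]

-- once in_imports is false, every remaining line goes to other_lines
theorem pvFoldA_false (ls : List String) (imp oth : List String) :
    ls.foldl pvStepA (imp, oth, false) = (imp, oth ++ ls, false) := by
  induction ls generalizing oth with
  | nil => simp
  | cons l ls ih =>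
    simp only [List.foldl_cons, pvStepA]
    split_ifs <;> simp_all

-- while in_imports is true, non-body lines accumulate in import_lines; the first
-- body line (if any) flips the flag and the rest goes to other_lines
theorem pvFoldA_true (ls : List String) (imp oth : List String) :
    ls.foldl pvStepA (imp, oth, true) =
      (imp ++ ls.takeWhile (fun l => !pvIsBody l),
       oth ++ ls.dropWhile (fun l => !pvIsBody l),
       ls.all (fun l => !pvIsBody l)) := by
  induction ls generalizing imp with
  | nil => simp
  | cons l ls ih =>
    rw [List.foldl_cons, pvStepA_true]
    by_cases hb : pvIsBody l = true
    · simp [hb, pvFoldA_false]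
    · have hb' : pvIsBody l = false := by simpa using hb
      simp [hb', ih]

theorem pvTake_findIdx (p : String → Bool) (ls : List String) :
    ls.take (ls.findIdx p) = ls.takeWhile (fun x => !p x) := by
  induction ls with
  | nil => simp
  | cons a l ih =>
    simp only [List.findIdx_cons, List.takeWhile_cons]
    by_cases h : p a = true <;> simp [h, ih]

theorem pvDrop_findIdx (p : String → Bool) (ls : List String) :
    ls.drop (ls.findIdx p) = ls.dropWhile (fun x => !p x) := by
  induction ls with
  | nil => simp
  | cons a l ih =>
    simp only [List.findIdx_cons, List.dropWhile_cons]
    by_cases h : p a = true <;> simp [h, ih]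

-- ===== VERDICT (by name: the statement is the Claim_ definition above) =====
theorem separate_import_and_other_lines_py_spec : Claim_equal_separate_import_and_other_lines_py := by
  intro content _
  unfold Spec_separate_import_and_other_lines_py
  unfold separate_import_and_other_lines_py separate_import_and_other_lines_py_alt
  simp only [pvFoldA_true, pvTake_findIdx, pvDrop_findIdx, List.nil_append]
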